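-- pv_equiv track=rewrite | github.com/Gamer2015/LaTeX | other/python/playground/semisquare.py | N
-- ===== SOURCE A (Python) =====
-- def N(dim, maxsum=None):
-- 	total = dim
-- 	if dim == 1:
-- 		while maxsum == None or total <= maxsum:
-- 			try:
-- 				yield tuple([total])
-- 			except GeneratorExit:
-- 				return
-- 			total += 1
-- 	else: # dim >= 2
-- 		while maxsum == None or total <= maxsum:
-- 			for tup in N(dim - 1, total - 1):
-- 				newTuple = [t for t in tup]
-- 				value = sum(newTuple)
-- 				newTuple.append(total - value)
-- 				try:
-- 					yield tuple(newTuple)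
-- 				except GeneratorExit:
-- 					return
-- 			total += 1
-- ===== SOURCE B (Python) =====
-- def N(dim, maxsum=None):
--     # Bottom-up dynamic programming instead of A's recursive descent:
--     # levels[i] accumulates, once and for all, the pairs (s, compositions of s
--     # into i+1 positive parts) in the order A emits them; each new total adds
--     # exactly one new row per level, built from the whole level below it.
--     if maxsum is not None and maxsum < dim:
--         return
--     levels = [[] for _ in range(dim)]
--     total = dim
--     while maxsum is None or total <= maxsum:
--         prev = []
--         for i in range(dim):
--             s = total - (dim - 1 - i)
--             if i == 0:
--                 comps = [(s,)]
--             else: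
--                 comps = [tup + (s - sub,) for sub, lst in prev for tup in lst]
--             levels[i].append((s, comps))
--             prev = levels[i]
--         for parts in prev[-1][1]:
--             try:
--                 yield parts
--             except GeneratorExit:
--                 return
--         total += 1
-- ===== Notes on version B (the rewrite author's own statement) =====
-- stated objective: alternative
-- what changed: A's recursive generator descent (re-enumerating all shorter tuples from scratch for every total) is replaced by a bottom-up dynamic-programming table shared across totals, in which each row of compositions is built exactly once from the level below it.
import Mathlib
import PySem

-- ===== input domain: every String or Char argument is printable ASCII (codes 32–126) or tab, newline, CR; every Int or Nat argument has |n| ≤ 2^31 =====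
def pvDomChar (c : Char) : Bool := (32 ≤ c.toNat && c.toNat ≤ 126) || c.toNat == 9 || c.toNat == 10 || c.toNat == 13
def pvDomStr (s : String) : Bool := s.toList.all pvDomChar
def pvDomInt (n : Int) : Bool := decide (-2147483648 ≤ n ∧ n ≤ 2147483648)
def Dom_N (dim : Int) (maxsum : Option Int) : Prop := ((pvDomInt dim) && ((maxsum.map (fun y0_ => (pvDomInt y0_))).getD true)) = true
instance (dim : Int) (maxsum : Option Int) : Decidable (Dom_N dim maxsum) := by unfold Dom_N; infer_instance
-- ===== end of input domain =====

-- B replaces A's recursive generator descent by a bottom-up dynamic-programming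
-- table reused across totals (each composition row is built once). Both versions
-- are generators in Python; equivalence is about the sequence of yielded tuples,
-- collected as a list.

-- ===== PORT A =====
-- A's recursion on dim (dim.toNat as structural measure; Pre_N guarantees 1 ≤ dim
-- or an empty range, so the toNat conversion is never observed on admitted inputs).
-- 'while maxsum is None or total <= maxsum' with maxsum = some m and total starting
-- at dim is the range dim..m; maxsum = none never terminates and is outside Pre_N.
def NAux : Nat → Int → List (List Int)
  | 0, _ => []                                       -- unreachable under Pre_N
  | 1, m => (PySem.List.pyRange 1 (m + 1) 1).map (fun t => [t])
  | (k + 2), m =>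
      (PySem.List.pyRange ((k : Int) + 2) (m + 1) 1).flatMap (fun total =>
        (NAux (k + 1) (total - 1)).map (fun tup => tup ++ [total - tup.sum]))

def N (dim : Int) (maxsum : Option Int) : List (List Int) :=
  match maxsum with
  | none => []                                       -- infinite generator: outside Pre_N
  | some m => NAux dim.toNat m

-- ===== PORT B =====
-- inner 'for i in range(dim)' loop of Source B: structural recursion over the list
-- 'levels', carrying s (= total - (dim - 1 - i)), the 'i == 0' flag and prev.
def innerB : List (List (Int × List (List Int))) → Int → Bool →
    List (Int × List (List Int)) → List (List (Int × List (List Int)))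
  | [], _, _, _ => []
  | lvl :: rest, s, first, prev =>
      let comps : List (List Int) :=
        if first then [[s]]
        else prev.flatMap (fun p => p.2.map (fun tup => tup ++ [s - p.1]))
      let lvl' := lvl ++ [(s, comps)]
      lvl' :: innerB rest (s + 1) false lvl'

def N_alt (dim : Int) (maxsum : Option Int) : List (List Int) :=
  match maxsum with
  | none => []                                       -- infinite generator: outside Pre_N
  | some m =>
      if m < dim then []                             -- early return before allocating the table
      else
      ((PySem.List.pyRange dim (m + 1) 1).foldl
        (fun st total =>
          let levels := innerB st.1 (total - dim + 1) true []
          -- 'for parts in prev[-1][1]' : prev = levels[-1]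
          (levels, st.2 ++ ((levels.getLast?.getD []).getLast?.getD (0, [])).2))
        (List.replicate dim.toNat [], [])).2

-- ===== PRECONDITION & SPEC =====
-- Pre_N excludes only inputs where A never returns a list: maxsum=None makes the
-- generator infinite, and dim ≤ 0 with maxsum ≥ dim makes A recurse forever
-- (RecursionError). All inputs on which list(N(...)) terminates are admitted.
def Pre_N (dim : Int) (maxsum : Option Int) : Prop :=
  maxsum ≠ none ∧ (1 ≤ dim ∨ maxsum.getD dim < dim)
instance (dim : Int) (maxsum : Option Int) : Decidable (Pre_N dim maxsum) := by
  unfold Pre_N; infer_instance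

def pvWitness_N : Int × Option Int := (3, some 7)

def Spec_N (dim : Int) (maxsum : Option Int) (out : List (List Int)) : Prop := out = N_alt dim maxsum
instance (dim : Int) (maxsum : Option Int) (out : List (List Int)) : Decidable (Spec_N dim maxsum out) := by unfold Spec_N; infer_instance

-- ===== CLAIM (what is proved, stated in full; the proofs are below) =====
def Claim_equal_N : Prop := ∀ (dim : Int) (maxsum : Option Int), Dom_N dim maxsum → Pre_N dim maxsum → Spec_N dim maxsum (N dim maxsum)

-- ===== LEMMAS AND PROOFS =====

-- Specification-level description of one table row: R k s = compositions of s
-- into k positive parts, in A's emission order.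
def R : Nat → Int → List (List Int)
  | 0, _ => []
  | 1, s => [[s]]
  | (k + 2), s =>
      (PySem.List.pyRange ((k : Int) + 1) s 1).flatMap (fun sub =>
        (R (k + 1) sub).map (fun tup => tup ++ [s - sub]))

lemma sum_R : ∀ (k : Nat) (s : Int) (l : List Int), l ∈ R k s → l.sum = s := by
  intro k
  induction k with
  | zero => intro s l h; simp [R] at h
  | succ k ih =>
    cases k with
    | zero => intro s l h; simp [R] at h; simp [h]
    | succ k =>
      intro s l h
      simp only [R, List.mem_flatMap, List.mem_map] at h
      obtain ⟨sub, _, tup, htup, rfl⟩ := h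
      have := ih sub tup htup
      simp [this]

lemma NAux_eq : ∀ (d : Nat) (m : Int),
    NAux (d + 1) m = (PySem.List.pyRange ((d : Int) + 1) (m + 1) 1).flatMap (fun t => R (d + 1) t) := by
  intro d
  induction d with
  | zero =>
    intro m
    simp [NAux, R, List.map_eq_flatMap]
  | succ d ih =>
    intro m
    show NAux (d + 2) m = _
    simp only [NAux]
    have hfun : ∀ total : Int,
        (NAux (d + 1) (total - 1)).map (fun tup => tup ++ [total - tup.sum]) = R (d + 2) total := by
      intro total
      rw [ih (total - 1)]
      have h1 : total - 1 + 1 = total := by ring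
      rw [h1]
      rw [List.map_flatMap]
      show _ = R (d + 2) total
      simp only [R]
      congr 1
      funext sub
      apply List.map_congr_left
      intro tup htup
      rw [sum_R (d + 1) sub tup htup]
    rw [show (((d:Nat)+1 : Nat) : Int) + 1 = (d : Int) + 2 by push_cast; ring]
    simp only [hfun]

-- one table level as it stands when its next row will have sum hi
def Lv (k : Nat) (hi : Int) : List (Int × List (List Int)) :=
  (PySem.List.pyRange (k : Int) hi 1).map (fun s => (s, R k s))

-- the levels k0, k0+1, …, k0+n-1 as they stand when level k0's next row has sum hi
def Suf (k0 n : Nat) (hi : Int) : List (List (Int × List (List Int))) :=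
  (List.range n).map (fun j => Lv (k0 + j) (hi + j))

lemma Suf_cons (k0 n : Nat) (hi : Int) :
    Suf k0 (n + 1) hi = Lv k0 hi :: Suf (k0 + 1) n (hi + 1) := by
  simp only [Suf, List.range_succ_eq_map, List.map_cons, List.map_map]
  congr 1
  · simp
  · apply List.map_congr_left
    intro j _
    simp only [Function.comp_apply]
    congr 1
    · omega
    · push_cast; ring

lemma Lv_succ (k : Nat) (s : Int) (h : (k : Int) ≤ s) :
    Lv k (s + 1) = Lv k s ++ [(s, R k s)] := by
  simp only [Lv, PySem.List.pyRange_one_succ_right h, List.map_append, List.map_cons,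
    List.map_nil]

lemma comps_eq (k : Nat) (s : Int) (h : 1 ≤ k) :
    (Lv k s).flatMap (fun p => p.2.map (fun tup => tup ++ [s - p.1])) = R (k + 1) s := by
  cases k with
  | zero => omega
  | succ k =>
    show _ = R (k + 2) s
    simp only [Lv, R, List.flatMap_map]
    have : ((k : Int) + 1) = (((k + 1 : Nat)) : Int) := by push_cast; ring
    rw [this]

lemma innerB_false : ∀ (n k : Nat) (s : Int), 1 ≤ k → ((k : Int) + 1) ≤ s →
    innerB (Suf (k + 1) n s) s false (Lv k s) = Suf (k + 1) n (s + 1) := by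
  intro n
  induction n with
  | zero => intro k s _ _; simp [Suf, innerB]
  | succ n ih =>
    intro k s hk hs
    rw [Suf_cons, Suf_cons]
    simp only [innerB, Bool.false_eq_true, if_false]
    rw [comps_eq k s hk]
    have hlv : Lv (k + 1) s ++ [(s, R (k + 1) s)] = Lv (k + 1) (s + 1) :=
      (Lv_succ (k + 1) s (by push_cast; omega)).symm
    rw [hlv]
    have := ih (k + 1) (s + 1) (by omega) (by push_cast; omega)
    rw [show (k + 1) + 1 = k + 2 from rfl] at this
    rw [this]

lemma innerB_true : ∀ (n : Nat) (s : Int), 1 ≤ s →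
    innerB (Suf 1 (n + 1) s) s true [] = Suf 1 (n + 1) (s + 1) := by
  intro n s hs
  rw [Suf_cons, Suf_cons]
  simp only [innerB, if_true]
  have h1 : Lv 1 s ++ [(s, [[s]])] = Lv 1 (s + 1) := by
    have := (Lv_succ 1 s (by exact_mod_cast hs)).symm
    simpa [R] using this
  rw [h1]
  rw [innerB_false n 1 (s + 1) (by omega) (by push_cast; omega)]

lemma Lv_nil (k : Nat) (hi : Int) (h : hi ≤ (k : Int)) : Lv k hi = [] := by
  simp [Lv, PySem.List.pyRange_one_eq_nil h]

lemma Suf_one_replicate (n : Nat) : Suf 1 n 1 = List.replicate n [] := by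
  rw [List.eq_replicate_iff]
  refine ⟨by simp [Suf], ?_⟩
  intro b hb
  simp only [Suf, List.mem_map, List.mem_range] at hb
  obtain ⟨j, _, rfl⟩ := hb
  exact Lv_nil (1 + j) (1 + (j : Int)) (by push_cast; omega)

lemma Suf_getLast (n : Nat) (hi : Int) :
    (Suf 1 (n + 1) hi).getLast? = some (Lv (1 + n) (hi + n)) := by
  simp only [Suf, List.getLast?_map, List.range_succ, List.getLast?_concat, Option.map_some]

lemma Lv_getLast (k : Nat) (hi : Int) (h : (k : Int) < hi) :
    (Lv k hi).getLast? = some (hi - 1, R k (hi - 1)) := by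
  have h1 : Lv k hi = Lv k (hi - 1) ++ [(hi - 1, R k (hi - 1))] := by
    have := Lv_succ k (hi - 1) (by omega)
    rwa [show hi - 1 + 1 = hi by ring] at this
  rw [h1, List.getLast?_concat]

lemma fold_outer (dim : Int) (hdim : 1 ≤ dim) : ∀ (j : Nat),
    (PySem.List.pyRange dim (dim + (j : Int)) 1).foldl
      (fun st total =>
        let levels := innerB st.1 (total - dim + 1) true []
        (levels, st.2 ++ ((levels.getLast?.getD []).getLast?.getD (0, [])).2))
      (List.replicate dim.toNat [], [])
    = (Suf 1 dim.toNat ((j : Int) + 1),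
       (PySem.List.pyRange dim (dim + (j : Int)) 1).flatMap (fun t => R dim.toNat t)) := by
  obtain ⟨n, hn⟩ : ∃ n, dim.toNat = n + 1 := ⟨dim.toNat - 1, by omega⟩
  intro j
  induction j with
  | zero =>
    rw [show dim + ((0 : Nat) : Int) = dim by push_cast; ring,
      PySem.List.pyRange_one_eq_nil (le_refl dim)]
    simp [Suf_one_replicate]
  | succ j ih =>
    rw [show dim + ((j + 1 : Nat) : Int) = (dim + (j : Int)) + 1 by push_cast; ring,
      PySem.List.pyRange_one_succ_right (by omega : dim ≤ dim + (j : Int)),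
      List.foldl_append, List.flatMap_append, ih]
    simp only [List.foldl_cons, List.foldl_nil, List.flatMap_cons, List.flatMap_nil,
      List.append_nil]
    rw [show dim + (j : Int) - dim + 1 = (j : Int) + 1 by ring]
    rw [hn, innerB_true n ((j : Int) + 1) (by omega)]
    rw [Suf_getLast n ((j : Int) + 1 + 1)]
    simp only [Option.getD_some]
    rw [Lv_getLast (1 + n) ((j : Int) + 1 + 1 + (n : Int)) (by push_cast; omega)]
    simp only [Option.getD_some]
    have hdn : ((dim.toNat : Int)) = dim := Int.toNat_of_nonneg (by omega)
    have harg : (j : Int) + 1 + 1 + (n : Int) - 1 = dim + (j : Int) := by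
      have : ((n : Int)) + 1 = dim := by rw [← hdn, hn]; push_cast; ring
      omega
    rw [harg, show 1 + n = n + 1 by omega,
      show ((j + 1 : Nat) : Int) + 1 = ((j : Int) + 1) + 1 by push_cast; ring]

-- ===== VERDICT (by name: the statement is the Claim_ definition above) =====
theorem N_spec : Claim_equal_N := by
  intro dim maxsum _ hpre
  unfold Spec_N
  cases maxsum with
  | none => exact absurd rfl hpre.1
  | some m =>
    simp only [N, N_alt]
    by_cases hlt : m < dim
    · rw [if_pos hlt]
      by_cases hdim : 1 ≤ dim
      · obtain ⟨n, hn⟩ : ∃ n, dim.toNat = n + 1 := ⟨dim.toNat - 1, by omega⟩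
        have hdn : ((dim.toNat : Int)) = dim := Int.toNat_of_nonneg (by omega)
        have hd2 : ((n : Int)) + 1 = dim := by rw [← hdn, hn]; push_cast; ring
        rw [hn, NAux_eq n m, hd2, PySem.List.pyRange_one_eq_nil (by omega : m + 1 ≤ dim)]
        simp
      · rw [show dim.toNat = 0 by omega]
        simp [NAux]
    rw [if_neg hlt]
    have hdim : 1 ≤ dim := by
      rcases hpre.2 with h | h
      · exact h
      · simp only [Option.getD_some] at h; omega
    · obtain ⟨n, hn⟩ : ∃ n, dim.toNat = n + 1 := ⟨dim.toNat - 1, by omega⟩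
      have hdn : ((dim.toNat : Int)) = dim := Int.toNat_of_nonneg (by omega)
      have hd2 : ((n : Int)) + 1 = dim := by rw [← hdn, hn]; push_cast; ring
      have hNA : NAux dim.toNat m
          = (PySem.List.pyRange dim (m + 1) 1).flatMap (fun t => R dim.toNat t) := by
        rw [hn, NAux_eq n m, hd2]
      obtain ⟨j, hj⟩ : ∃ j : Nat, m + 1 = dim + (j : Int) :=
        ⟨(m + 1 - dim).toNat, by omega⟩
      rw [hNA, hj, fold_outer dim hdim j]
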